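-- pv_equiv track=rewrite | github.com/hehehe47/LeetCode | Akuna/Balanced or not.py | ba
-- ===== SOURCE A (Python) =====
-- def ba(s):
--     l = []
--     for i in s:
--         if len(l) == 0:
--             l.append(i)
--             continue
--         if i == ')' and l[-1] == '(':
--             l.pop()
--         else:
--             l.append(i)
--
--     return (l)
--
--     a = 1
-- ===== SOURCE B (Python) =====
-- def ba(s):
--     while "()" in s:
--         s = s.replace("()", "")
--     return list(s)
-- ===== Notes on version B (the rewrite author's own statement) =====
-- stated objective: simpler
-- what changed: Replaces the explicit left-to-right stack pass by repeatedly deleting every literal '()' substring with str.replace until a fixed point, then returning list(s).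
import Mathlib
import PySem

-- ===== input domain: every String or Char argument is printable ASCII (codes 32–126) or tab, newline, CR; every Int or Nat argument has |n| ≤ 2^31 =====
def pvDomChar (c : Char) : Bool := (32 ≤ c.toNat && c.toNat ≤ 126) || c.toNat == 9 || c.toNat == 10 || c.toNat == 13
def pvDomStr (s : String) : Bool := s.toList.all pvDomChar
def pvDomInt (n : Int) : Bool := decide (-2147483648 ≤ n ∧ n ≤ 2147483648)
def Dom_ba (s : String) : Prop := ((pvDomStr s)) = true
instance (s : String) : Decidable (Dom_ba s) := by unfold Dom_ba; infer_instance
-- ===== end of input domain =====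

-- B replaces A's one-pass stack reduction by repeated deletion of the literal "()" substring to a fixed point; objective: simpler (not faster).

-- ===== PORT A =====
-- one loop iteration of A: the stack update for character i
def baStep (l : List Char) (i : Char) : List Char :=
  if l = [] then l ++ [i]
  else if i = ')' ∧ l.getLast? = some '(' then l.dropLast
  else l ++ [i]

def ba (s : String) : List String :=
  (s.toList.foldl baStep []).map (fun c => String.mk [c])

-- ===== PORT B =====
-- "()" in s
def baHasPair : List Char → Bool
  | a :: b :: r => (a = '(' && b = ')') || baHasPair (b :: r)
  | _ => false

-- one s.replace("()", "") pass: delete all non-overlapping "()" left to right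
def baReplPass : List Char → List Char
  | [] => []
  | [c] => [c]
  | a :: b :: r => if a = '(' ∧ b = ')' then baReplPass r else a :: baReplPass (b :: r)

theorem baReplPass_length_lt : ∀ cs : List Char, baHasPair cs = true → (baReplPass cs).length < cs.length := by
  have hle : ∀ cs : List Char, (baReplPass cs).length ≤ cs.length := by
    intro cs
    fun_induction baReplPass cs <;> simp_all <;> omega
  intro cs
  fun_induction baReplPass cs with
  | case1 => simp [baHasPair]
  | case2 => simp [baHasPair]
  | case3 a b r hab ih => intro _; have := hle r; simp; omega
  | case4 a b r hab ih =>
    intro h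
    simp only [baHasPair, Bool.or_eq_true, Bool.and_eq_true, decide_eq_true_eq] at h
    rcases h with ⟨h1, h2⟩ | h
    · exact absurd ⟨h1, h2⟩ hab
    · have := ih h; simp at this ⊢; omega

-- the while loop of B
def baReduce (cs : List Char) : List Char :=
  if h : baHasPair cs then baReduce (baReplPass cs) else cs
  termination_by cs.length
  decreasing_by exact baReplPass_length_lt cs h

def ba_alt (s : String) : List String :=
  (baReduce s.toList).map (fun c => String.mk [c])

-- ===== PRECONDITION & SPEC =====
def Spec_ba (s : String) (out : List String) : Prop := out = ba_alt s
instance (s : String) (out : List String) : Decidable (Spec_ba s out) := by unfold Spec_ba; infer_instance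

-- ===== CLAIM (what is proved, stated in full; the proofs are below) =====
def Claim_equal_ba : Prop := ∀ (s : String), Dom_ba s → Spec_ba s (ba s)

-- ===== LEMMAS AND PROOFS =====

-- processing an adjacent "()" leaves A's stack unchanged
theorem baStep_pair (l : List Char) : baStep (baStep l '(') ')' = l := by
  by_cases h : l = []
  · subst h; simp [baStep]
  · simp [baStep, h]

theorem baStep_pair_foldl (l : List Char) (r : List Char) :
    List.foldl baStep l ('(' :: ')' :: r) = List.foldl baStep l r := by
  simp [List.foldl, baStep_pair]

-- one replace pass does not change A's fold result
theorem foldl_baReplPass : ∀ (cs : List Char) (l : List Char),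
    List.foldl baStep l (baReplPass cs) = List.foldl baStep l cs := by
  intro cs
  fun_induction baReplPass cs with
  | case1 => intro l; rfl
  | case2 => intro l; rfl
  | case3 a b r hab ih =>
    intro l
    obtain ⟨ha, hb⟩ := hab
    subst ha; subst hb
    rw [baStep_pair_foldl, ih]
  | case4 a b r hab ih =>
    intro l
    simp only [List.foldl_cons] at *
    exact ih _

-- the reduction loop does not change A's fold result
theorem foldl_baReduce : ∀ (cs : List Char) (l : List Char),
    List.foldl baStep l (baReduce cs) = List.foldl baStep l cs := by
  intro cs
  fun_induction baReduce cs with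
  | case1 cs h ih => intro l; rw [ih, foldl_baReplPass]
  | case2 cs h => intro l; rfl

-- the fixed point contains no adjacent "()"
theorem baReduce_noPair (cs : List Char) : baHasPair (baReduce cs) = false := by
  fun_induction baReduce cs with
  | case1 cs h ih => exact ih
  | case2 cs h => simpa using h

-- tail of a pair-free list is pair-free
theorem baHasPair_tail {c : Char} {r : List Char} (h : baHasPair (c :: r) = false) :
    baHasPair r = false := by
  cases r with
  | nil => rfl
  | cons b t => simp [baHasPair] at h ⊢; exact h.2

-- on a pair-free input whose head cannot cancel with the stack top, A's fold only appends
theorem foldl_noPair : ∀ (cs : List Char) (l : List Char),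
    baHasPair cs = false →
    (l.getLast? = some '(' → cs.head? ≠ some ')') →
    List.foldl baStep l cs = l ++ cs := by
  intro cs
  induction cs with
  | nil => intro l _ _; simp
  | cons c r ih =>
    intro l hnp hj
    have hstep : baStep l c = l ++ [c] := by
      by_cases hl : l = []
      · simp [baStep, hl]
      · have : ¬ (c = ')' ∧ l.getLast? = some '(') := by
          rintro ⟨hc, hlast⟩
          exact hj hlast (by simp [hc])
        simp [baStep, hl, this]
    have hj' : (l ++ [c]).getLast? = some '(' → r.head? ≠ some ')' := by
      intro hlast hhd
      simp at hlast
      cases r with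
      | nil => simp at hhd
      | cons d t =>
        simp at hhd
        simp [baHasPair, hlast, hhd] at hnp
    have := ih (l ++ [c]) (baHasPair_tail hnp) hj'
    simp only [List.foldl_cons, hstep, this, List.append_assoc, List.singleton_append]

-- ===== VERDICT (by name: the statement is the Claim_ definition above) =====
theorem ba_spec : Claim_equal_ba := by
  intro s _
  unfold Spec_ba ba ba_alt
  have h1 : List.foldl baStep [] s.toList = baReduce s.toList := by
    rw [← foldl_baReduce]
    exact foldl_noPair _ [] (baReduce_noPair _) (by simp)
  rw [h1]
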